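-- pv_equiv track=rewrite | github.com/bpandola/advent-of-code | 2016/day_02.py | build_direction_map
-- ===== SOURCE A (Python) =====
-- def build_direction_map(keypad_layout):
--     coord_to_key = {}
--     key_to_coord = {}
--     y = 0
--     for row in keypad_layout:
--         x = 0
--         for key in row:
--             if key != ' ':
--                 coord_to_key[(x, y)] = key
--                 key_to_coord[key] = (x, y)
--             x += 1
--         y += 1
--     direction_map = {}
--     for key, location in key_to_coord.items():
--         x, y = location
--         direction_map[key] = {
--             'L': coord_to_key.get((x - 1, y), key),
--             'R': coord_to_key.get((x + 1, y), key),
--             'U': coord_to_key.get((x, y - 1), key),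
--             'D': coord_to_key.get((x, y + 1), key),
--         }
--     return direction_map
-- ===== SOURCE B (Python) =====
-- def build_direction_map(keypad_layout):
--     # Direction-wise sweeps: horizontal neighbors from each row zipped with its
--     # own shift, vertical neighbors from adjacent row pairs padded to equal
--     # length; no coordinate bookkeeping at all.
--     L, R, U, D = {}, {}, {}, {}
--     for row in keypad_layout:
--         prev = ' '
--         for b, nxt in zip(row, row[1:] + ' '):
--             if b != ' ':
--                 L[b] = prev if prev != ' ' else b
--                 R[b] = nxt if nxt != ' ' else b
--             prev = b
--     rows = [''] + list(keypad_layout) + ['']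
--     for r1, r2 in zip(rows, rows[1:]):
--         n = max(len(r1), len(r2))
--         for a, b in zip(r1.ljust(n), r2.ljust(n)):
--             if b != ' ':
--                 U[b] = a if a != ' ' else b
--             if a != ' ':
--                 D[a] = b if b != ' ' else a
--     return {k: {'L': L[k], 'R': R[k], 'U': U[k], 'D': D[k]} for k in L}
-- ===== Notes on version B (the rewrite author's own statement) =====
-- stated objective: alternative
-- what changed: B replaces A's coordinate dictionaries entirely: it computes four direction dictionaries by sweeping each row zipped with its own shift (left/right) and adjacent row pairs padded to equal length (up/down), then assembles the map from those sweeps; no coordinates are ever stored or looked up.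
import Mathlib
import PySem

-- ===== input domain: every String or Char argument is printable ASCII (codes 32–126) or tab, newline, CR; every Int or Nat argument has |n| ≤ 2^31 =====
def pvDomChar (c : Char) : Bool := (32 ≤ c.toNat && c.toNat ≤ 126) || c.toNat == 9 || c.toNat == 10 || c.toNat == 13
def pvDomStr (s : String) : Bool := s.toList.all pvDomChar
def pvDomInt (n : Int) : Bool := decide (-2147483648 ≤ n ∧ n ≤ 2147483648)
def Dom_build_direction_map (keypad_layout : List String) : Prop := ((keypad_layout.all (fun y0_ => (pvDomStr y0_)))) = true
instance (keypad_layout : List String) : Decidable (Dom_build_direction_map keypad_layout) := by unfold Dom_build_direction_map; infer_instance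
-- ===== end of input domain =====

-- B drops A's coordinate dictionaries entirely and instead fills four direction
-- dictionaries by direction-wise sweeps (each row zipped with its own shift for L/R,
-- adjacent row pairs padded to equal length for U/D), then assembles the result
-- (objective: alternative algorithm of the same cost).
-- Python 1-char strings (the grid characters) are Char internally and are rendered
-- as 1-char Strings (String.ofList [c]) in the output, per the type convention.

-- ===== PORT A =====
-- inner loop body: "for key in row: if key != ' ': coord_to_key[(x,y)] = key; key_to_coord[key] = (x,y); x += 1"

def bdmCellStep (y : Int)
    (st : PySem.Dict (Int × Int) Char × PySem.Dict Char (Int × Int) × Int) (key : Char) :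
    PySem.Dict (Int × Int) Char × PySem.Dict Char (Int × Int) × Int :=
  if key ≠ ' ' then
    (st.1.insert (st.2.2, y) key, st.2.1.insert key (st.2.2, y), st.2.2 + 1)
  else (st.1, st.2.1, st.2.2 + 1)

-- outer loop body: "for row in keypad_layout: x = 0; <inner loop>; y += 1"

def bdmRowStep (st : PySem.Dict (Int × Int) Char × PySem.Dict Char (Int × Int) × Int)
    (row : String) : PySem.Dict (Int × Int) Char × PySem.Dict Char (Int × Int) × Int :=
  let st2 := row.toList.foldl (bdmCellStep st.2.2) (st.1, st.2.1, 0)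
  (st2.1, st2.2.1, st.2.2 + 1)

-- phase 2: "for key, location in key_to_coord.items(): direction_map[key] = {...}"
-- (the inner dict literal has the four distinct keys L,R,U,D, so its items are these four pairs in order)

def build_direction_map (keypad_layout : List String) : List (String × List (String × String)) :=
  let st := keypad_layout.foldl bdmRowStep (PySem.Dict.empty, PySem.Dict.empty, 0)
  let coord_to_key := st.1
  let key_to_coord := st.2.1
  let direction_map := key_to_coord.items.foldl
    (fun (dm : PySem.Dict String (List (String × String))) p =>
      dm.insert (String.ofList [p.1])
        [("L", String.ofList [coord_to_key.getD (p.2.1 - 1, p.2.2) p.1]),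
         ("R", String.ofList [coord_to_key.getD (p.2.1 + 1, p.2.2) p.1]),
         ("U", String.ofList [coord_to_key.getD (p.2.1, p.2.2 - 1) p.1]),
         ("D", String.ofList [coord_to_key.getD (p.2.1, p.2.2 + 1) p.1])])
    PySem.Dict.empty
  direction_map.items


-- ===== PORT B =====
-- "r.ljust(n)" with the default space fill (exact: pads on the right to length n)

def pvLjust (cs : List Char) (n : Nat) : List Char := cs ++ List.replicate (n - cs.length) ' '

-- "for b, nxt in zip(row, row[1:] + ' '): if b != ' ': L[b] = ...; R[b] = ...; prev = b"
-- state = (L, R, prev)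

def hCell (st : PySem.Dict Char Char × PySem.Dict Char Char × Char) (p : Char × Char) :
    PySem.Dict Char Char × PySem.Dict Char Char × Char :=
  if p.1 ≠ ' ' then
    (st.1.insert p.1 (if st.2.2 ≠ ' ' then st.2.2 else p.1),
     st.2.1.insert p.1 (if p.2 ≠ ' ' then p.2 else p.1), p.1)
  else (st.1, st.2.1, p.1)

-- "for row in keypad_layout: prev = ' '; <inner zip loop>"

def hRow (st : PySem.Dict Char Char × PySem.Dict Char Char) (row : String) :
    PySem.Dict Char Char × PySem.Dict Char Char :=
  let r := (List.zip row.toList (PySem.List.slice row.toList (some 1) none ++ [' '])).foldl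
    hCell (st.1, st.2, ' ')
  (r.1, r.2.1)

-- "for a, b in zip(r1.ljust(n), r2.ljust(n)): if b != ' ': U[b] = ...; if a != ' ': D[a] = ..."
-- state = (U, D)

def vCell (st : PySem.Dict Char Char × PySem.Dict Char Char) (p : Char × Char) :
    PySem.Dict Char Char × PySem.Dict Char Char :=
  (if p.2 ≠ ' ' then st.1.insert p.2 (if p.1 ≠ ' ' then p.1 else p.2) else st.1,
   if p.1 ≠ ' ' then st.2.insert p.1 (if p.2 ≠ ' ' then p.2 else p.1) else st.2)

-- "for r1, r2 in zip(rows, rows[1:]): n = max(len(r1), len(r2)); <inner zip loop>"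

def vPair (st : PySem.Dict Char Char × PySem.Dict Char Char) (p : String × String) :
    PySem.Dict Char Char × PySem.Dict Char Char :=
  let n := max p.1.toList.length p.2.toList.length
  (List.zip (pvLjust p.1.toList n) (pvLjust p.2.toList n)).foldl vCell st

-- "return {k: {'L': L[k], 'R': R[k], 'U': U[k], 'D': D[k]} for k in L}"
-- every key of L is also a key of R, U and D (every non-space cell is written in all four
-- sweeps), so the Python lookups L[k]/R[k]/U[k]/D[k] never raise; getD's default is never used.

def build_direction_map_alt (keypad_layout : List String) : List (String × List (String × String)) :=
  let hr := keypad_layout.foldl hRow (PySem.Dict.empty, PySem.Dict.empty)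
  let rows := [""] ++ keypad_layout ++ [""]
  let vr := (List.zip rows (PySem.List.slice rows (some 1) none)).foldl vPair
    (PySem.Dict.empty, PySem.Dict.empty)
  ((hr.1.keys).foldl
    (fun (dm : PySem.Dict String (List (String × String))) k =>
      dm.insert (String.ofList [k])
        [("L", String.ofList [hr.1.getD k ' ']),
         ("R", String.ofList [hr.2.getD k ' ']),
         ("U", String.ofList [vr.1.getD k ' ']),
         ("D", String.ofList [vr.2.getD k ' '])])
    PySem.Dict.empty).items


-- ===== PRECONDITION & SPEC =====
def Spec_build_direction_map (keypad_layout : List String) (out : List (String × List (String × String))) : Prop := out = build_direction_map_alt keypad_layout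
instance (keypad_layout : List String) (out : List (String × List (String × String))) : Decidable (Spec_build_direction_map keypad_layout out) := by unfold Spec_build_direction_map; infer_instance

-- ===== CLAIM (what is proved, stated in full; the proofs are below) =====
def Claim_equal_build_direction_map : Prop := ∀ (keypad_layout : List String), Dom_build_direction_map keypad_layout → Spec_build_direction_map keypad_layout (build_direction_map keypad_layout)

-- ===== LEMMAS AND PROOFS =====

-- the non-space cells of one row / of the whole grid, with their coordinates

def rowCells : List Char → Int → Int → List (Char × Int × Int)
  | [], _, _ => []
  | c :: cs, x, y => if c ≠ ' ' then (c, x, y) :: rowCells cs (x + 1) y else rowCells cs (x + 1) y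

def gridCells : List String → Int → List (Char × Int × Int)
  | [], _ => []
  | r :: rs, y => rowCells r.toList 0 y ++ gridCells rs (y + 1)

-- bounds-guarded direct neighbor lookup (proof-side characterisation of both programs)

def bdmNeighbor (keypad_layout : List String) (x y : Int) (key : Char) : Char :=
  if 0 ≤ y ∧ y < (keypad_layout.length : Int) then
    let row := (keypad_layout.getD y.toNat "").toList
    if 0 ≤ x ∧ x < (row.length : Int) ∧ row.getD x.toNat ' ' ≠ ' ' then row.getD x.toNat ' '
    else key
  else key

def bdmEntry (keypad_layout : List String) (x y : Int) (key : Char) : List (String × String) :=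
  [("L", String.ofList [bdmNeighbor keypad_layout (x - 1) y key]),
   ("R", String.ofList [bdmNeighbor keypad_layout (x + 1) y key]),
   ("U", String.ofList [bdmNeighbor keypad_layout x (y - 1) key]),
   ("D", String.ofList [bdmNeighbor keypad_layout x (y + 1) key])]

-- the fold steps the dict constructions reduce to

def insC (d : PySem.Dict (Int × Int) Char) (p : Char × Int × Int) : PySem.Dict (Int × Int) Char :=
  d.insert (p.2.1, p.2.2) p.1

def insK (d : PySem.Dict Char (Int × Int)) (p : Char × Int × Int) : PySem.Dict Char (Int × Int) :=
  d.insert p.1 p.2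

def insB (layout : List String) (dm : PySem.Dict String (List (String × String)))
    (p : Char × Int × Int) : PySem.Dict String (List (String × String)) :=
  dm.insert (String.ofList [p.1]) (bdmEntry layout p.2.1 p.2.2 p.1)

-- per-direction value functions and the generic single-direction insert step

def eL (layout : List String) (p : Char × Int × Int) : Char :=
  bdmNeighbor layout (p.2.1 - 1) p.2.2 p.1
def eR (layout : List String) (p : Char × Int × Int) : Char :=
  bdmNeighbor layout (p.2.1 + 1) p.2.2 p.1
def eU (layout : List String) (p : Char × Int × Int) : Char :=
  bdmNeighbor layout p.2.1 (p.2.2 - 1) p.1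
def eD (layout : List String) (p : Char × Int × Int) : Char :=
  bdmNeighbor layout p.2.1 (p.2.2 + 1) p.1

def insV (f : Char × Int × Int → Char) (d : PySem.Dict Char Char) (p : Char × Int × Int) :
    PySem.Dict Char Char :=
  d.insert p.1 (f p)

-- value-mapping of the key_to_coord dict into the canonical direction map (A side)

def dmapB (layout : List String) (d : PySem.Dict Char (Int × Int)) :
    PySem.Dict String (List (String × String)) :=
  PySem.Dict.mk (d.items.map (fun p => (String.ofList [p.1], bdmEntry layout p.2.1 p.2.2 p.1)))

lemma beq_ofList_single (a b : Char) : (String.ofList [a] == String.ofList [b]) = (a == b) := by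
  by_cases h : a = b <;> simp [h, String.ext_iff]

lemma foldl_cellStep (row : List Char) (d1 : PySem.Dict (Int × Int) Char)
    (d2 : PySem.Dict Char (Int × Int)) (x0 y : Int) :
    row.foldl (bdmCellStep y) (d1, d2, x0) =
      ((rowCells row x0 y).foldl insC d1, (rowCells row x0 y).foldl insK d2,
        x0 + row.length) := by
  induction row generalizing d1 d2 x0 with
  | nil => simp [rowCells]
  | cons c cs ih =>
    by_cases h : c = ' '
    · simp [rowCells, bdmCellStep, h, ih]
      ring
    · simp [rowCells, bdmCellStep, h, ih, insC, insK]
      ring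

lemma foldl_rowStep (layout : List String) (d1 : PySem.Dict (Int × Int) Char)
    (d2 : PySem.Dict Char (Int × Int)) (y0 : Int) :
    layout.foldl bdmRowStep (d1, d2, y0) =
      ((gridCells layout y0).foldl insC d1, (gridCells layout y0).foldl insK d2,
        y0 + layout.length) := by
  induction layout generalizing d1 d2 y0 with
  | nil => simp [gridCells]
  | cons r rs ih =>
    simp [gridCells, bdmRowStep, foldl_cellStep, ih, List.foldl_append]
    ring

lemma items_dmapB (layout : List String) (d : PySem.Dict Char (Int × Int)) :
    (dmapB layout d).items
      = d.items.map (fun p => (String.ofList [p.1], bdmEntry layout p.2.1 p.2.2 p.1)) := rfl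

def rowLook (row : List Char) (x : Int) : Option Char :=
  if 0 ≤ x ∧ x < (row.length : Int) ∧ row.getD x.toNat ' ' ≠ ' ' then some (row.getD x.toNat ' ')
  else none

def gridLook : List String → Int → Int → Int → Option Char
  | [], _, _, _ => none
  | r :: rs, y0, a, b => if b = y0 then rowLook r.toList a else gridLook rs (y0 + 1) a b

lemma rowLook_neg (cs : List Char) (x : Int) (h : x < 0) : rowLook cs x = none := by
  unfold rowLook
  rw [if_neg]
  rintro ⟨h1, -⟩
  omega

lemma rowLook_cons (c : Char) (cs : List Char) (x : Int) :
    rowLook (c :: cs) x = if x = 0 then (if c ≠ ' ' then some c else none)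
      else rowLook cs (x - 1) := by
  by_cases h0 : x = 0
  · subst h0
    unfold rowLook
    by_cases hc : c = ' ' <;> simp [hc]
  · rw [if_neg h0]
    by_cases hneg : x < 0
    · rw [rowLook_neg _ _ hneg, rowLook_neg _ _ (by omega)]
    · unfold rowLook
      have hx : x.toNat = (x - 1).toNat + 1 := by omega
      rw [show (c :: cs).getD x.toNat ' ' = cs.getD (x - 1).toNat ' ' by rw [hx]; rfl]
      by_cases hc : 0 ≤ x - 1 ∧ x - 1 < (cs.length : Int) ∧ cs.getD (x - 1).toNat ' ' ≠ ' '
      · have hlt := hc.2.1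
        rw [if_pos (by rw [List.length_cons]; push_cast; exact ⟨by omega, by omega, hc.2.2⟩), if_pos hc]
      · rw [if_neg, if_neg hc]
        rintro ⟨h1, h2, h3⟩
        rw [List.length_cons] at h2
        push_cast at h2
        exact hc ⟨by omega, by omega, h3⟩

lemma get?_foldl_insC_rowCells (row : List Char) (x0 y : Int)
    (d : PySem.Dict (Int × Int) Char) (a b : Int) :
    ((rowCells row x0 y).foldl insC d).get? (a, b) =
      if b = y then (rowLook row (a - x0)).or (d.get? (a, b)) else d.get? (a, b) := by
  induction row generalizing x0 d with
  | nil => by_cases h : b = y <;> simp [rowCells, rowLook, h]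
  | cons c cs ih =>
    rw [rowLook_cons]
    by_cases hc : c = ' '
    · rw [show rowCells (c :: cs) x0 y = rowCells cs (x0 + 1) y by simp [rowCells, hc], ih]
      by_cases hb : b = y
      · rw [if_pos hb, if_pos hb]
        by_cases ha0 : a - x0 = 0
        · rw [if_pos ha0, if_neg (by simp [hc]), rowLook_neg _ _ (by omega)]
        · rw [if_neg ha0, show a - (x0 + 1) = a - x0 - 1 from by omega]
      · rw [if_neg hb, if_neg hb]
    · rw [show rowCells (c :: cs) x0 y = (c, x0, y) :: rowCells cs (x0 + 1) y by
          simp [rowCells, hc],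
        List.foldl_cons, ih]
      by_cases hb : b = y
      · subst hb
        rw [if_pos rfl, if_pos rfl]
        by_cases ha0 : a - x0 = 0
        · rw [if_pos ha0, if_pos hc, rowLook_neg _ _ (by omega),
            show (insC d (c, x0, b)).get? (a, b) = some c by
              rw [show insC d (c, x0, b) = d.insert (x0, b) c from rfl,
                PySem.Dict.get?_insert]
              exact if_pos (by rw [Prod.ext_iff]; exact ⟨by omega, rfl⟩)]
          simp
        · rw [if_neg ha0, show a - (x0 + 1) = a - x0 - 1 from by omega,
            show (insC d (c, x0, b)).get? (a, b) = d.get? (a, b) by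
              rw [show insC d (c, x0, b) = d.insert (x0, b) c from rfl,
                PySem.Dict.get?_insert]
              exact if_neg (by rw [Prod.ext_iff]; rintro ⟨h1, -⟩; omega)]
      · rw [if_neg hb, if_neg hb,
          show (insC d (c, x0, y)).get? (a, b) = d.get? (a, b) by
            rw [show insC d (c, x0, y) = d.insert (x0, y) c from rfl,
              PySem.Dict.get?_insert]
            exact if_neg (by rw [Prod.ext_iff]; rintro ⟨-, h2⟩; exact hb h2)]

lemma gridLook_eq_none (rs : List String) (y0 a b : Int) (h : b < y0) :
    gridLook rs y0 a b = none := by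
  induction rs generalizing y0 with
  | nil => rfl
  | cons r rrs ih =>
    rw [show gridLook (r :: rrs) y0 a b
        = if b = y0 then rowLook r.toList a else gridLook rrs (y0 + 1) a b from rfl,
      if_neg (by omega), ih _ (by omega)]

lemma get?_foldl_insC_gridCells (rs : List String) (y0 : Int)
    (d : PySem.Dict (Int × Int) Char) (a b : Int) :
    ((gridCells rs y0).foldl insC d).get? (a, b) =
      (gridLook rs y0 a b).or (d.get? (a, b)) := by
  induction rs generalizing y0 d with
  | nil => simp [gridCells, gridLook]
  | cons r rrs ih =>
    rw [show gridCells (r :: rrs) y0 = rowCells r.toList 0 y0 ++ gridCells rrs (y0 + 1) from rfl,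
      List.foldl_append, ih, get?_foldl_insC_rowCells,
      show gridLook (r :: rrs) y0 a b
        = if b = y0 then rowLook r.toList a else gridLook rrs (y0 + 1) a b from rfl]
    by_cases hb : b = y0
    · rw [if_pos hb, if_pos hb, gridLook_eq_none _ _ _ _ (by omega),
        show a - 0 = a from by omega]
      simp
    · rw [if_neg hb, if_neg hb]

lemma gridLook_eq_index (rs : List String) (y0 a b : Int) :
    gridLook rs y0 a b =
      if 0 ≤ b - y0 ∧ b - y0 < (rs.length : Int) then
        rowLook ((rs.getD (b - y0).toNat "").toList) a
      else none := by
  induction rs generalizing y0 with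
  | nil => simp [gridLook]
  | cons r rrs ih =>
    rw [show gridLook (r :: rrs) y0 a b
        = if b = y0 then rowLook r.toList a else gridLook rrs (y0 + 1) a b from rfl]
    by_cases hb : b = y0
    · rw [if_pos hb, if_pos (by rw [List.length_cons]; push_cast; omega),
        show (b - y0).toNat = 0 from by omega]
      rfl
    · rw [if_neg hb, ih]
      by_cases hr : 0 ≤ b - (y0 + 1) ∧ b - (y0 + 1) < (rrs.length : Int)
      · rw [if_pos hr, if_pos (by rw [List.length_cons]; push_cast; omega),
          show (b - y0).toNat = (b - (y0 + 1)).toNat + 1 from by omega]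
        rfl
      · rw [if_neg hr, if_neg]
        rintro ⟨h1, h2⟩
        rw [List.length_cons] at h2
        push_cast at h2
        exact hr ⟨by omega, by omega⟩

lemma getD_c2k (layout : List String) (a b : Int) (c : Char) :
    (((gridCells layout 0).foldl insC PySem.Dict.empty).getD (a, b) c) =
      bdmNeighbor layout a b c := by
  rw [PySem.Dict.getD_eq_get?_getD, get?_foldl_insC_gridCells, gridLook_eq_index,
    bdmNeighbor]
  by_cases hy : 0 ≤ b ∧ b < (layout.length : Int)
  · rw [if_pos (by constructor <;> omega), if_pos hy,
      show b - 0 = b from by omega]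
    unfold rowLook
    by_cases hx : 0 ≤ a ∧ a < (((layout.getD b.toNat "").toList).length : Int) ∧
        ((layout.getD b.toNat "").toList).getD a.toNat ' ' ≠ ' '
    · rw [if_pos hx, if_pos hx]
      simp
    · rw [if_neg hx, if_neg hx]
      simp [PySem.Dict.get?_empty]
  · rw [if_neg (by intro h; exact hy ⟨by omega, by omega⟩), if_neg hy]
    simp [PySem.Dict.get?_empty]

lemma keys_k2c_nodup (layout : List String) :
    (((gridCells layout 0).foldl insK PySem.Dict.empty).keys).Nodup := by
  exact PySem.Dict.nodup_keys_foldl_insert_key (gridCells layout 0) Prod.fst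
    (fun _ x => x.2) PySem.Dict.empty (by simp)

lemma phase2_items (c2k : PySem.Dict (Int × Int) Char) (l : List (Char × Int × Int))
    (h : (l.map (fun p => String.ofList [p.1])).Nodup) :
    (l.foldl
      (fun (dm : PySem.Dict String (List (String × String))) p =>
        dm.insert (String.ofList [p.1])
          [("L", String.ofList [c2k.getD (p.2.1 - 1, p.2.2) p.1]),
           ("R", String.ofList [c2k.getD (p.2.1 + 1, p.2.2) p.1]),
           ("U", String.ofList [c2k.getD (p.2.1, p.2.2 - 1) p.1]),
           ("D", String.ofList [c2k.getD (p.2.1, p.2.2 + 1) p.1])])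
      PySem.Dict.empty).items =
      l.map (fun p => (String.ofList [p.1],
        [("L", String.ofList [c2k.getD (p.2.1 - 1, p.2.2) p.1]),
         ("R", String.ofList [c2k.getD (p.2.1 + 1, p.2.2) p.1]),
         ("U", String.ofList [c2k.getD (p.2.1, p.2.2 - 1) p.1]),
         ("D", String.ofList [c2k.getD (p.2.1, p.2.2 + 1) p.1])])) := by
  exact (PySem.Dict.items_foldl_insert_fresh l _ _ PySem.Dict.empty
    (fun a _ => by simp) h).trans
    (by rw [show (PySem.Dict.empty : PySem.Dict String (List (String × String))).items
          = [] from rfl, List.nil_append])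

lemma contains_dmapB (layout : List String) (d : PySem.Dict Char (Int × Int)) (k : Char) :
    (dmapB layout d).contains (String.ofList [k]) = d.contains k := by
  rw [PySem.Dict.contains_eq_decide_mem_keys, PySem.Dict.contains_eq_decide_mem_keys]
  simp only [PySem.Dict.keys, items_dmapB, List.map_map]
  congr 1
  simp only [eq_iff_iff, List.mem_map, Function.comp]
  constructor
  · rintro ⟨p, hp, h⟩
    exact ⟨p, hp, (by simpa using congrArg String.toList h.symm : k = p.1).symm⟩
  · rintro ⟨p, hp, h⟩
    exact ⟨p, hp, by simp [h]⟩

lemma dmapB_insert (layout : List String) (d : PySem.Dict Char (Int × Int)) (k : Char)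
    (v : Int × Int) :
    dmapB layout (d.insert k v) =
      (dmapB layout d).insert (String.ofList [k]) (bdmEntry layout v.1 v.2 k) := by
  apply PySem.Dict.ext
  by_cases h : d.contains k
  · rw [items_dmapB, PySem.Dict.items_insert_of_contains _ _ h,
      PySem.Dict.items_insert_of_contains _ _ (by rw [contains_dmapB]; exact h),
      items_dmapB]
    simp only [List.map_map]
    apply List.map_congr_left
    intro p _
    simp only [Function.comp]
    by_cases hp : p.1 = k <;> simp [hp, beq_ofList_single]
  · rw [items_dmapB, PySem.Dict.items_insert_of_not_contains _ _ (by simpa using h),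
      PySem.Dict.items_insert_of_not_contains _ _
        (by rw [contains_dmapB]; simpa using h),
      items_dmapB]
    simp

lemma foldl_insB_dmapB (layout : List String) (l : List (Char × Int × Int))
    (d : PySem.Dict Char (Int × Int)) :
    l.foldl (insB layout) (dmapB layout d) = dmapB layout (l.foldl insK d) := by
  induction l generalizing d with
  | nil => rfl
  | cons p ps ih =>
    simp only [List.foldl_cons, insK]
    have h2 : insB layout (dmapB layout d) p = dmapB layout (d.insert p.1 p.2) :=
      (dmapB_insert layout d p.1 p.2).symm
    rw [h2, ih]

-- ===== A equals the canonical per-cell fold =====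

lemma A_eq_canon (layout : List String) :
    build_direction_map layout =
      ((gridCells layout 0).foldl (insB layout) PySem.Dict.empty).items := by
  simp only [build_direction_map]
  rw [foldl_rowStep]
  rw [phase2_items _ _ (by
    have h1 : ((((gridCells layout 0).foldl insK PySem.Dict.empty).items).map
        (fun p => String.ofList [p.1]))
        = ((((gridCells layout 0).foldl insK PySem.Dict.empty).keys)).map
          (fun c => String.ofList [c]) := by
      simp [PySem.Dict.keys, List.map_map, Function.comp]
    rw [h1]
    exact (keys_k2c_nodup layout).map
      (fun a b h => by simpa using congrArg String.toList h))]
  rw [show (PySem.Dict.empty : PySem.Dict String (List (String × String)))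
      = dmapB layout PySem.Dict.empty from rfl,
    foldl_insB_dmapB, items_dmapB]
  apply List.map_congr_left
  intro p _
  simp [bdmEntry, getD_c2k]

-- ===== B equals the canonical per-cell fold =====

-- rowLook read off the suffix at position x

lemma rowLook_drop (full : List Char) (x : Int) (hx : 0 ≤ x) :
    rowLook full x = if (full.drop x.toNat).headD ' ' = ' ' then none
      else some ((full.drop x.toNat).headD ' ') := by
  unfold rowLook
  by_cases hlt : x < (full.length : Int)
  · have hn : x.toNat < full.length := by omega
    have hne : full.drop x.toNat ≠ [] := by
      intro h
      have := congrArg List.length h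
      simp at this
      omega
    have hh : (full.drop x.toNat).headD ' ' = full.getD x.toNat ' ' := by
      rw [List.headD_eq_head?_getD, List.head?_drop, List.getD_eq_getElem?_getD]
    rw [hh]
    by_cases hsp : full.getD x.toNat ' ' = ' '
    · rw [if_pos hsp, if_neg]
      rintro ⟨-, -, h3⟩
      exact h3 hsp
    · rw [if_neg hsp, if_pos ⟨hx, hlt, hsp⟩]
  · have hdrop : full.drop x.toNat = [] := by
      apply List.drop_eq_nil_of_le
      omega
    rw [hdrop]
    simp only [List.headD_nil, if_pos]
    rw [if_neg]
    rintro ⟨-, h2, -⟩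
    omega

lemma nbr_in_range (layout : List String) (x y : Int) (c : Char)
    (hy : 0 ≤ y ∧ y < (layout.length : Int)) :
    bdmNeighbor layout x y c = (rowLook (layout.getD y.toNat "").toList x).getD c := by
  simp only [bdmNeighbor, rowLook, if_pos hy]
  split_ifs with h <;> rfl

lemma nbr_out_of_range (layout : List String) (x y : Int) (c : Char)
    (hy : ¬ (0 ≤ y ∧ y < (layout.length : Int))) :
    bdmNeighbor layout x y c = c := by
  unfold bdmNeighbor
  rw [if_neg hy]

-- RowAt layout y full: full is the character list of row y (or [] if y is out of range)

def RowAt (layout : List String) (y : Int) (full : List Char) : Prop :=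
  (0 ≤ y ∧ y < (layout.length : Int) ∧ (layout.getD y.toNat "").toList = full) ∨
  (¬ (0 ≤ y ∧ y < (layout.length : Int)) ∧ full = [])

lemma nbr_rowAt (layout : List String) (x y : Int) (c : Char) (full : List Char)
    (h : RowAt layout y full) :
    bdmNeighbor layout x y c = (rowLook full x).getD c := by
  rcases h with ⟨h1, h2, h3⟩ | ⟨h1, h2⟩
  · rw [nbr_in_range layout x y c ⟨h1, h2⟩, h3]
  · rw [nbr_out_of_range layout x y c h1, h2]
    unfold rowLook
    rw [if_neg]
    · rfl
    · rintro ⟨h0, h, -⟩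
      simp at h
      omega

-- the zip list of the horizontal sweep unfolds head-first

lemma zipH_cons (b : Char) (rest : List Char) :
    List.zip (b :: rest) ((b :: rest).drop 1 ++ [' '])
      = (b, rest.headD ' ') :: List.zip rest (rest.drop 1 ++ [' ']) := by
  cases rest <;> simp [List.zip]

-- horizontal sweep over one row = per-cell fold of the L/R direction values

lemma hfold (layout : List String) (y : Int) (full : List Char)
    (hy : 0 ≤ y ∧ y < (layout.length : Int))
    (hfull : (layout.getD y.toNat "").toList = full) :
    ∀ (cs : List Char) (x : Int) (prev : Char) (L R : PySem.Dict Char Char),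
      0 ≤ x → full.drop x.toNat = cs →
      rowLook full (x - 1) = (if prev = ' ' then none else some prev) →
      (List.zip cs (cs.drop 1 ++ [' '])).foldl hCell (L, R, prev)
        = ((rowCells cs x y).foldl (insV (eL layout)) L,
           (rowCells cs x y).foldl (insV (eR layout)) R, cs.getLastD prev) := by
  intro cs
  induction cs with
  | nil =>
    intro x prev L R hx hdrop hprev
    simp [rowCells]
  | cons b rest ih =>
    intro x prev L R hx hdrop hprev
    have hdrop1 : full.drop (x + 1).toNat = rest := by
      rw [show (x + 1).toNat = x.toNat + 1 from by omega, ← List.tail_drop, hdrop]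
      rfl
    have hlx : rowLook full x = if b = ' ' then none else some b := by
      rw [rowLook_drop full x hx, hdrop]
      rfl
    have hlx1 : rowLook full (x + 1)
        = if rest.headD ' ' = ' ' then none else some (rest.headD ' ') := by
      rw [rowLook_drop full (x + 1) (by omega), hdrop1]
    have hprev' : rowLook full (x + 1 - 1) = if b = ' ' then none else some b := by
      rw [show x + 1 - 1 = x from by omega]
      exact hlx
    rw [zipH_cons, List.foldl_cons]
    by_cases hb : b = ' '
    · rw [show hCell (L, R, prev) (b, rest.headD ' ') = (L, R, b) by simp [hCell, hb]]
      rw [ih (x + 1) b L R (by omega) hdrop1 hprev', List.getLastD_cons]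
      simp [rowCells, hb]
    · have hL : (if prev ≠ ' ' then prev else b) = eL layout (b, x, y) := by
        simp only [eL]
        rw [nbr_in_range layout (x - 1) y b hy, hfull, hprev]
        by_cases hp : prev = ' ' <;> simp [hp]
      have hR : (if rest.headD ' ' ≠ ' ' then rest.headD ' ' else b) = eR layout (b, x, y) := by
        simp only [eR]
        rw [nbr_in_range layout (x + 1) y b hy, hfull, hlx1]
        by_cases hn : rest.headD ' ' = ' '
        · rw [hn]
          simp
        · rw [if_pos hn, if_neg hn]
          rfl
      rw [show hCell (L, R, prev) (b, rest.headD ' ')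
          = (L.insert b (eL layout (b, x, y)), R.insert b (eR layout (b, x, y)), b) by
        simp only [hCell, if_pos hb]
        rw [← hL, ← hR]]
      rw [ih (x + 1) b _ _ (by omega) hdrop1 hprev', List.getLastD_cons]
      simp [rowCells, hb, insV]

lemma hrows (layout : List String) :
    ∀ (rs : List String) (y0 : Int) (L R : PySem.Dict Char Char),
      0 ≤ y0 → layout.drop y0.toNat = rs →
      rs.foldl hRow (L, R)
        = ((gridCells rs y0).foldl (insV (eL layout)) L,
           (gridCells rs y0).foldl (insV (eR layout)) R) := by
  intro rs
  induction rs with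
  | nil =>
    intro y0 L R h0 hdrop
    simp [gridCells]
  | cons r rrs ih =>
    intro y0 L R h0 hdrop
    have hlen : y0.toNat < layout.length := by
      by_contra h
      rw [List.drop_eq_nil_of_le (by omega)] at hdrop
      cases hdrop
    have hr : layout.getD y0.toNat "" = r := by
      have h2 : (layout.drop y0.toNat).headD "" = r := by rw [hdrop]; rfl
      rwa [List.headD_eq_head?_getD, List.head?_drop, ← List.getD_eq_getElem?_getD] at h2
    have hdrop1 : layout.drop (y0 + 1).toNat = rrs := by
      rw [show (y0 + 1).toNat = y0.toNat + 1 from by omega, ← List.tail_drop, hdrop]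
      rfl
    rw [List.foldl_cons]
    have hz : hRow (L, R) r
        = ((rowCells r.toList 0 y0).foldl (insV (eL layout)) L,
           (rowCells r.toList 0 y0).foldl (insV (eR layout)) R) := by
      simp only [hRow, PySem.List.slice_from_one]
      rw [show r.toList.tail = r.toList.drop 1 from List.drop_one.symm,
        hfold layout y0 r.toList ⟨h0, by omega⟩ (congrArg String.toList hr)
          r.toList 0 ' ' L R (by omega) (by simp)
          (by rw [rowLook_neg _ _ (by omega)]; simp)]
    rw [hz, ih (y0 + 1) _ _ (by omega) hdrop1]
    simp [gridCells, List.foldl_append]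

-- padded zip of two rows

def padZip : List Char → List Char → List (Char × Char)
  | [], bs => bs.map (fun b => (' ', b))
  | a :: as, [] => (a, ' ') :: padZip as []
  | a :: as, b :: bs => (a, b) :: padZip as bs

lemma zip_replicate_left (bs : List Char) :
    List.zip (List.replicate bs.length ' ') bs = bs.map (fun b => (' ', b)) := by
  induction bs with
  | nil => rfl
  | cons b bs ih => simp [List.replicate_succ, ih]

lemma zip_replicate_right (as : List Char) :
    List.zip as (List.replicate as.length ' ') = padZip as [] := by
  induction as with
  | nil => rfl
  | cons a as ih => simp [List.replicate_succ, padZip, ih]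

lemma zip_ljust (as bs : List Char) :
    List.zip (pvLjust as (max as.length bs.length)) (pvLjust bs (max as.length bs.length))
      = padZip as bs := by
  induction as generalizing bs with
  | nil =>
    simp only [pvLjust, List.length_nil, Nat.zero_max, List.nil_append, Nat.sub_self,
      List.replicate_zero, List.append_nil]
    exact zip_replicate_left bs
  | cons a as ih =>
    cases bs with
    | nil =>
      rw [show (a :: as).length = as.length + 1 from rfl,
        show ([] : List Char).length = 0 from rfl, Nat.max_zero,
        show pvLjust (a :: as) (as.length + 1) = a :: as from by
          simp [pvLjust],
        show pvLjust [] (as.length + 1) = ' ' :: List.replicate as.length ' ' from by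
          simp [pvLjust, List.replicate_succ],
        show List.zip (a :: as) (' ' :: List.replicate as.length ' ')
          = (a, ' ') :: List.zip as (List.replicate as.length ' ') from rfl,
        zip_replicate_right]
      rfl
    | cons b bs' =>
      rw [show (a :: as).length = as.length + 1 from rfl, show (b :: bs').length = bs'.length + 1 from rfl,
        show max (as.length + 1) (bs'.length + 1) = max as.length bs'.length + 1 from by omega,
        show pvLjust (a :: as) (max as.length bs'.length + 1)
            = a :: pvLjust as (max as.length bs'.length) from by
          simp [pvLjust, Nat.succ_sub_succ],
        show pvLjust (b :: bs') (max as.length bs'.length + 1)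
            = b :: pvLjust bs' (max as.length bs'.length) from by
          simp [pvLjust, Nat.succ_sub_succ]]
      rw [show List.zip (a :: pvLjust as (max as.length bs'.length))
            (b :: pvLjust bs' (max as.length bs'.length))
          = (a, b) :: List.zip (pvLjust as (max as.length bs'.length))
            (pvLjust bs' (max as.length bs'.length)) from rfl, ih]
      rfl

-- vertical sweep over one padded row pair = per-cell folds of the U/D direction values

lemma vfold (layout : List String) (y : Int) (full1 full2 : List Char)
    (h1 : RowAt layout y full1) (h2 : RowAt layout (y + 1) full2) :
    ∀ (as bs : List Char) (x : Int) (U D : PySem.Dict Char Char),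
      0 ≤ x → full1.drop x.toNat = as → full2.drop x.toNat = bs →
      (padZip as bs).foldl vCell (U, D)
        = ((rowCells bs x (y + 1)).foldl (insV (eU layout)) U,
           (rowCells as x y).foldl (insV (eD layout)) D) := by
  intro as
  induction as with
  | nil =>
    intro bs
    induction bs with
    | nil =>
      intro x U D hx h1d h2d
      simp [padZip, rowCells]
    | cons b bs' ihb =>
      intro x U D hx h1d h2d
      have h1d' : full1.drop (x + 1).toNat = [] := by
        apply List.drop_eq_nil_of_le
        have h := congrArg List.length h1d
        simp at h
        omega
      have h2d' : full2.drop (x + 1).toNat = bs' := by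
        rw [show (x + 1).toNat = x.toNat + 1 from by omega, ← List.tail_drop, h2d]
        rfl
      have hvU : (if (' ' : Char) ≠ ' ' then ' ' else b) = eU layout (b, x, y + 1) := by
        simp only [eU]
        rw [show (y : Int) + 1 - 1 = y from by omega,
          nbr_rowAt layout x y b full1 h1, rowLook_drop full1 x hx, h1d]
        simp
      rw [show padZip [] (b :: bs') = (' ', b) :: padZip [] bs' from rfl, List.foldl_cons,
        show vCell (U, D) (' ', b)
            = ((if b ≠ ' ' then U.insert b (eU layout (b, x, y + 1)) else U), D) by
          simp only [vCell]
          rw [hvU]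
          simp]
      rw [ihb (x + 1) _ _ (by omega) h1d' h2d']
      by_cases hb : b = ' ' <;> simp [rowCells, hb, insV]
  | cons a as' iha =>
    intro bs
    cases bs with
    | nil =>
      intro x U D hx h1d h2d
      have h1d' : full1.drop (x + 1).toNat = as' := by
        rw [show (x + 1).toNat = x.toNat + 1 from by omega, ← List.tail_drop, h1d]
        rfl
      have h2d' : full2.drop (x + 1).toNat = [] := by
        apply List.drop_eq_nil_of_le
        have h := congrArg List.length h2d
        simp at h
        omega
      have hvD : (if (' ' : Char) ≠ ' ' then ' ' else a) = eD layout (a, x, y) := by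
        simp only [eD]
        rw [nbr_rowAt layout x (y + 1) a full2 h2, rowLook_drop full2 x hx, h2d]
        simp
      rw [show padZip (a :: as') [] = (a, ' ') :: padZip as' [] from rfl, List.foldl_cons,
        show vCell (U, D) (a, ' ')
            = (U, (if a ≠ ' ' then D.insert a (eD layout (a, x, y)) else D)) by
          simp only [vCell]
          rw [hvD]
          simp]
      rw [iha [] (x + 1) _ _ (by omega) h1d' h2d']
      by_cases ha : a = ' ' <;> simp [rowCells, ha, insV]
    | cons b bs' =>
      intro x U D hx h1d h2d
      have h1d' : full1.drop (x + 1).toNat = as' := by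
        rw [show (x + 1).toNat = x.toNat + 1 from by omega, ← List.tail_drop, h1d]
        rfl
      have h2d' : full2.drop (x + 1).toNat = bs' := by
        rw [show (x + 1).toNat = x.toNat + 1 from by omega, ← List.tail_drop, h2d]
        rfl
      have hvU : (if a ≠ ' ' then a else b) = eU layout (b, x, y + 1) := by
        simp only [eU]
        rw [show (y : Int) + 1 - 1 = y from by omega,
          nbr_rowAt layout x y b full1 h1, rowLook_drop full1 x hx, h1d]
        by_cases hp : a = ' ' <;> simp [hp]
      have hvD : (if b ≠ ' ' then b else a) = eD layout (a, x, y) := by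
        simp only [eD]
        rw [nbr_rowAt layout x (y + 1) a full2 h2, rowLook_drop full2 x hx, h2d]
        by_cases hp : b = ' ' <;> simp [hp]
      rw [show padZip (a :: as') (b :: bs') = (a, b) :: padZip as' bs' from rfl, List.foldl_cons,
        show vCell (U, D) (a, b)
            = ((if b ≠ ' ' then U.insert b (eU layout (b, x, y + 1)) else U),
               (if a ≠ ' ' then D.insert a (eD layout (a, x, y)) else D)) by
          simp only [vCell]
          rw [hvU, hvD]]
      rw [iha bs' (x + 1) _ _ (by omega) h1d' h2d']
      by_cases hb : b = ' ' <;> by_cases ha : a = ' ' <;> simp [rowCells, hb, ha, insV]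

lemma vrows (layout : List String) :
    ∀ (rs : List String) (y0 : Int) (prev : String) (U D : PySem.Dict Char Char),
      0 ≤ y0 → layout.drop y0.toNat = rs → RowAt layout (y0 - 1) prev.toList →
      (List.zip (prev :: (rs ++ [""])) (rs ++ [""])).foldl vPair (U, D)
        = ((gridCells rs y0).foldl (insV (eU layout)) U,
           ((rowCells prev.toList 0 (y0 - 1) ++ gridCells rs y0)).foldl (insV (eD layout)) D) := by
  intro rs
  induction rs with
  | nil =>
    intro y0 prev U D h0 hdrop hprev
    have hlen : layout.length ≤ y0.toNat := by
      by_contra h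
      have h2 := congrArg List.length hdrop
      simp at h2
      omega
    have h2 : RowAt layout y0 ([] : List Char) := Or.inr ⟨by rintro ⟨-, hl⟩; omega, rfl⟩
    rw [show List.zip (prev :: (([] : List String) ++ [""])) (([] : List String) ++ [""])
        = [(prev, "")] from rfl]
    rw [show List.foldl vPair (U, D) [(prev, "")] = vPair (U, D) (prev, "") from rfl]
    simp only [vPair]
    rw [show ("" : String).toList = [] from rfl, zip_ljust]
    have hv := vfold layout (y0 - 1) prev.toList [] hprev
      (by rw [show y0 - 1 + 1 = y0 from by omega]; exact h2)
      prev.toList [] 0 U D (by omega) (by simp) (by simp)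
    rw [show y0 - 1 + 1 = y0 from by omega] at hv
    rw [hv]
    simp [gridCells, rowCells]
  | cons r rrs ih =>
    intro y0 prev U D h0 hdrop hprev
    have hlen : y0.toNat < layout.length := by
      by_contra h
      rw [List.drop_eq_nil_of_le (by omega)] at hdrop
      cases hdrop
    have hr : layout.getD y0.toNat "" = r := by
      have h2 : (layout.drop y0.toNat).headD "" = r := by rw [hdrop]; rfl
      rwa [List.headD_eq_head?_getD, List.head?_drop, ← List.getD_eq_getElem?_getD] at h2
    have hdrop1 : layout.drop (y0 + 1).toNat = rrs := by
      rw [show (y0 + 1).toNat = y0.toNat + 1 from by omega, ← List.tail_drop, hdrop]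
      rfl
    have hrowAt : RowAt layout y0 r.toList :=
      Or.inl ⟨h0, by omega, congrArg String.toList hr⟩
    rw [show (r :: rrs) ++ [""] = r :: (rrs ++ [""]) from rfl,
      show List.zip (prev :: r :: (rrs ++ [""])) (r :: (rrs ++ [""]))
        = (prev, r) :: List.zip (r :: (rrs ++ [""])) (rrs ++ [""]) from rfl,
      List.foldl_cons]
    have hv : vPair (U, D) (prev, r)
        = ((rowCells r.toList 0 y0).foldl (insV (eU layout)) U,
           (rowCells prev.toList 0 (y0 - 1)).foldl (insV (eD layout)) D) := by
      simp only [vPair]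
      rw [zip_ljust]
      have hv2 := vfold layout (y0 - 1) prev.toList r.toList hprev
        (by rw [show y0 - 1 + 1 = y0 from by omega]; exact hrowAt)
        prev.toList r.toList 0 U D (by omega) (by simp) (by simp)
      rw [show y0 - 1 + 1 = y0 from by omega] at hv2
      exact hv2
    rw [hv, ih (y0 + 1) r _ _ (by omega) hdrop1
      (by rw [show y0 + 1 - 1 = y0 from by omega]; exact hrowAt)]
    rw [show y0 + 1 - 1 = y0 from by omega]
    simp [gridCells, List.foldl_append]

-- generic last-write-wins lookup for an insert fold

lemma getD_foldl_insert_keyval {γ κ ν : Type} [BEq κ] [LawfulBEq κ] [DecidableEq κ]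
    (l : List γ) (key : γ → κ) (val : γ → ν) (d : PySem.Dict κ ν) (k : κ) (dflt : ν) :
    (l.foldl (fun d p => d.insert (key p) (val p)) d).getD k dflt
      = ((l.filter (fun p => key p == k)).getLast?.elim (d.getD k dflt) val) := by
  induction l using List.reverseRecOn with
  | nil => simp
  | append_singleton l p ih =>
    rw [List.foldl_append, List.foldl_cons, List.foldl_nil, List.filter_append]
    by_cases h : key p = k
    · rw [show List.filter (fun p => key p == k) [p] = [p] from by simp [h],
        List.getLast?_concat, PySem.Dict.getD_insert, if_pos h.symm]
      rfl
    · rw [show List.filter (fun p => key p == k) [p] = [] from by simp [h],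
        List.append_nil, PySem.Dict.getD_insert, if_neg (fun hk => h hk.symm)]
      exact ih

-- keys of the canonical fold correspond to keys of the direction dicts

lemma ofList_single_inj (a b : Char) : String.ofList [a] = String.ofList [b] ↔ a = b := by
  constructor
  · intro h
    have h2 := congrArg String.toList h
    simpa using h2
  · intro h
    rw [h]

lemma contains_map_single (s : List Char) (a : Char) :
    PySem.Set.contains (s.map (fun c => String.ofList [c])) (String.ofList [a])
      = PySem.Set.contains s a := by
  simp [PySem.Set.contains, ofList_single_inj]

lemma foldl_add_map (l : List Char) :
    ∀ s : List Char,
      (l.map (fun c => String.ofList [c])).foldl PySem.Set.add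
          (s.map (fun c => String.ofList [c]))
        = (l.foldl PySem.Set.add s).map (fun c => String.ofList [c]) := by
  induction l with
  | nil => intro s; rfl
  | cons a l ih =>
    intro s
    rw [List.map_cons, List.foldl_cons, List.foldl_cons,
      show PySem.Set.add (s.map (fun c => String.ofList [c])) (String.ofList [a])
          = (PySem.Set.add s a).map (fun c => String.ofList [c]) from by
        simp only [PySem.Set.add, contains_map_single]
        by_cases h : a ∈ s <;> simp [h]]
    exact ih (PySem.Set.add s a)

lemma ofList_map_single (l : List Char) :
    PySem.Set.ofList (l.map (fun c => String.ofList [c]))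
      = (PySem.Set.ofList l).map (fun c => String.ofList [c]) := by
  rw [PySem.Set.ofList_eq_foldl, PySem.Set.ofList_eq_foldl]
  have h := foldl_add_map l []
  simpa using h

lemma B_eq_canon (layout : List String) :
    build_direction_map_alt layout =
      ((gridCells layout 0).foldl (insB layout) PySem.Dict.empty).items := by
  simp only [build_direction_map_alt]
  rw [PySem.List.slice_from_one,
    show (([""] ++ layout ++ [""]) : List String).tail = layout ++ [""] from rfl,
    show (([""] ++ layout ++ [""]) : List String) = "" :: (layout ++ [""]) from rfl,
    hrows layout layout 0 PySem.Dict.empty PySem.Dict.empty (by omega) (by simp),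
    vrows layout layout 0 "" PySem.Dict.empty PySem.Dict.empty (by omega) (by simp)
      (Or.inr ⟨by rintro ⟨h1, -⟩; omega, rfl⟩)]
  rw [show rowCells ("" : String).toList 0 (0 - 1) = [] from rfl, List.nil_append]
  dsimp only
  have hK : (List.foldl (insV (eL layout)) PySem.Dict.empty (gridCells layout 0)).keys
      = PySem.Set.ofList ((gridCells layout 0).map Prod.fst) :=
    PySem.Dict.keys_foldl_insert_key (gridCells layout 0) Prod.fst
      (fun _ p => eL layout p) PySem.Dict.empty
  have hnodupK : (List.foldl (insV (eL layout)) PySem.Dict.empty (gridCells layout 0)).keys.Nodup :=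
    PySem.Dict.nodup_keys_foldl_insert_key (gridCells layout 0) Prod.fst
      (fun _ p => eL layout p) PySem.Dict.empty (by simp)
  have hmapNodup :
      ((List.foldl (insV (eL layout)) PySem.Dict.empty (gridCells layout 0)).keys.map
        (fun k => String.ofList [k])).Nodup :=
    hnodupK.map (fun a b h => (ofList_single_inj a b).mp h)
  rw [PySem.Dict.items_foldl_insert_fresh
      ((List.foldl (insV (eL layout)) PySem.Dict.empty (gridCells layout 0)).keys)
      (fun k => String.ofList [k]) _ PySem.Dict.empty (fun a _ => by simp) hmapNodup,
    show (PySem.Dict.empty : PySem.Dict String (List (String × String))).items = [] from rfl,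
    List.nil_append]
  have hCnodup : (List.foldl (insB layout) PySem.Dict.empty (gridCells layout 0)).keys.Nodup :=
    PySem.Dict.nodup_keys_foldl_insert_key (gridCells layout 0) (fun p => String.ofList [p.1])
      (fun _ p => bdmEntry layout p.2.1 p.2.2 p.1) PySem.Dict.empty (by simp)
  have hCkeys : (List.foldl (insB layout) PySem.Dict.empty (gridCells layout 0)).keys
      = PySem.Set.ofList ((gridCells layout 0).map (fun p => String.ofList [p.1])) :=
    PySem.Dict.keys_foldl_insert_key (gridCells layout 0) (fun p => String.ofList [p.1])
      (fun _ p => bdmEntry layout p.2.1 p.2.2 p.1) PySem.Dict.empty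
  rw [PySem.Dict.items_eq_map_keys
      (List.foldl (insB layout) PySem.Dict.empty (gridCells layout 0)) hCnodup [],
    hCkeys,
    show (gridCells layout 0).map (fun p => String.ofList [p.1])
        = ((gridCells layout 0).map Prod.fst).map (fun c => String.ofList [c]) from by
      rw [List.map_map]
      rfl,
    ofList_map_single, ← hK, List.map_map]
  apply List.map_congr_left
  intro k hk
  have hmem : k ∈ (gridCells layout 0).map Prod.fst := by
    rw [hK] at hk
    exact (PySem.Set.mem_ofList _ _).mp hk
  have hne : (gridCells layout 0).filter (fun p => p.1 == k) ≠ [] := by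
    obtain ⟨p, hp, hpk⟩ := List.mem_map.mp hmem
    intro h0
    have hmem2 : p ∈ (gridCells layout 0).filter (fun p => p.1 == k) :=
      List.mem_filter.mpr ⟨hp, by simp [hpk]⟩
    rw [h0] at hmem2
    cases hmem2
  obtain ⟨q, hq⟩ : ∃ q, ((gridCells layout 0).filter (fun p => p.1 == k)).getLast? = some q := by
    cases hql : ((gridCells layout 0).filter (fun p => p.1 == k)).getLast? with
    | none => exact absurd (List.getLast?_eq_none_iff.mp hql) hne
    | some q => exact ⟨q, rfl⟩
  have hL' : (List.foldl (insV (eL layout)) PySem.Dict.empty (gridCells layout 0)).getD k ' '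
      = eL layout q := by
    have h := getD_foldl_insert_keyval (gridCells layout 0) Prod.fst (eL layout)
      PySem.Dict.empty k ' '
    rw [hq] at h
    exact h
  have hR' : (List.foldl (insV (eR layout)) PySem.Dict.empty (gridCells layout 0)).getD k ' '
      = eR layout q := by
    have h := getD_foldl_insert_keyval (gridCells layout 0) Prod.fst (eR layout)
      PySem.Dict.empty k ' '
    rw [hq] at h
    exact h
  have hU' : (List.foldl (insV (eU layout)) PySem.Dict.empty (gridCells layout 0)).getD k ' '
      = eU layout q := by
    have h := getD_foldl_insert_keyval (gridCells layout 0) Prod.fst (eU layout)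
      PySem.Dict.empty k ' '
    rw [hq] at h
    exact h
  have hD' : (List.foldl (insV (eD layout)) PySem.Dict.empty (gridCells layout 0)).getD k ' '
      = eD layout q := by
    have h := getD_foldl_insert_keyval (gridCells layout 0) Prod.fst (eD layout)
      PySem.Dict.empty k ' '
    rw [hq] at h
    exact h
  have hC : (List.foldl (insB layout) PySem.Dict.empty (gridCells layout 0)).getD
      (String.ofList [k]) [] = bdmEntry layout q.2.1 q.2.2 q.1 := by
    have h := getD_foldl_insert_keyval (gridCells layout 0) (fun p => String.ofList [p.1])
      (fun p => bdmEntry layout p.2.1 p.2.2 p.1) PySem.Dict.empty (String.ofList [k]) []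
    rw [List.filter_congr (fun p _ => by rw [beq_ofList_single]), hq] at h
    exact h
  simp only [Function.comp]
  rw [hL', hR', hU', hD', hC]
  simp [bdmEntry, eL, eR, eU, eD]

-- ===== VERDICT (by name: the statement is the Claim_ definition above) =====
theorem build_direction_map_spec : Claim_equal_build_direction_map := by
  intro keypad_layout _
  show build_direction_map keypad_layout = build_direction_map_alt keypad_layout
  rw [A_eq_canon, B_eq_canon]
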